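-- pv_equiv track=rewrite | github.com/LoganFriedrich/MouseReach | src/mousereach/outcomes/v6_cascade/stage_24_transition_triangulation.py | _sustained_count
-- ===== SOURCE A (Python) =====
-- def _sustained_count(arr, min_run):
--     total = 0
--     run = 0
--     for v in arr:
--         if v:
--             run += 1
--         else:
--             if run >= min_run:
--                 total += run
--             run = 0
--     if run >= min_run:
--         total += run
--     return total
-- ===== SOURCE B (Python) =====
-- def _sustained_count(arr, min_run):
--     # Run-length encode truthiness (most recent group last), then filter-sum.
--     runs = []  # list of (truthy, length); runs[-1] is the group of the most recently seen element
--     for v in reversed(arr):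
--         t = bool(v)
--         if runs and runs[-1][0] == t:
--             runs[-1] = (t, runs[-1][1] + 1)
--         else:
--             runs.append((t, 1))
--     return sum(n for t, n in runs if t and n >= min_run)
-- ===== Notes on version B (the rewrite author's own statement) =====
-- stated objective: alternative
-- what changed: B first run-length-encodes the array by truthiness into a list of (truthy, length) groups and then filter-sums the truthy groups of length >= min_run, instead of A's single pass with a run counter, reset branch and post-loop flush.
import Mathlib
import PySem

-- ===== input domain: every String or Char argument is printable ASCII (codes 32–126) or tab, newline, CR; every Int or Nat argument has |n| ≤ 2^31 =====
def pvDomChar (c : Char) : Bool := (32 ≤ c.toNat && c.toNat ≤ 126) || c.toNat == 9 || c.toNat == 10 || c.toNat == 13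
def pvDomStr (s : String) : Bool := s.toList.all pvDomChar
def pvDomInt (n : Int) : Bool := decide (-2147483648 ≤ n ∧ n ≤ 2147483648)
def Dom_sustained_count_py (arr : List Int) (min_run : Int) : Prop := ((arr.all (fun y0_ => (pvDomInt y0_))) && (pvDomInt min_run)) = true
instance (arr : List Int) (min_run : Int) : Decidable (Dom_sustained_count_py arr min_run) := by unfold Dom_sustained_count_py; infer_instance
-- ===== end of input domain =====

-- B replaces A's run-counter/flush loop by run-length-encoding the array by truthiness
-- and filter-summing the truthy groups (alternative decomposition, same cost).


-- ===== PORT A =====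
-- A's for-loop over arr with state (total, run), then the post-loop flush.
def aGo (min_run : Int) : List Int → Int → Int → Int
  | [], total, run => if min_run ≤ run then total + run else total
  | v :: rest, total, run =>
    if v != 0 then aGo min_run rest total (run + 1)
    else aGo min_run rest (if min_run ≤ run then total + run else total) 0

def sustained_count_py (arr : List Int) (min_run : Int) : Int := aGo min_run arr 0 0

-- ===== PORT B =====
-- run-length encoding by truthiness; head = group of the most recently seen element
def groupRuns : List Int → List (Bool × Int)
  | [] => []
  | v :: rest =>
    let t := v != 0
    match groupRuns rest with
    | (k, n) :: gs => if k = t then (k, n + 1) :: gs else (t, 1) :: (k, n) :: gs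
    | [] => [(t, 1)]

def sumRuns (min_run : Int) : List (Bool × Int) → Int
  | [] => 0
  | (k, n) :: gs => (if k ∧ min_run ≤ n then n else 0) + sumRuns min_run gs

def sustained_count_py_alt (arr : List Int) (min_run : Int) : Int :=
  sumRuns min_run (groupRuns arr)

-- ===== PRECONDITION & SPEC =====
def Spec_sustained_count_py (arr : List Int) (min_run : Int) (out : Int) : Prop := out = sustained_count_py_alt arr min_run
instance (arr : List Int) (min_run : Int) (out : Int) : Decidable (Spec_sustained_count_py arr min_run out) := by unfold Spec_sustained_count_py; infer_instance

-- ===== CLAIM (what is proved, stated in full; the proofs are below) =====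
def Claim_equal_sustained_count_py : Prop := ∀ (arr : List Int) (min_run : Int), Dom_sustained_count_py arr min_run → Spec_sustained_count_py arr min_run (sustained_count_py arr min_run)

-- ===== LEMMAS AND PROOFS =====
-- a pending run of length `run` prepended to the group list
def prependRun (run : Int) (gs : List (Bool × Int)) : List (Bool × Int) :=
  if run = 0 then gs else
    match gs with
    | (true, n) :: tail => (true, run + n) :: tail
    | _ => (true, run) :: gs

theorem aGo_eq (min_run : Int) (arr : List Int) :
    ∀ total run : Int, 0 ≤ run →
      aGo min_run arr total run = total + sumRuns min_run (prependRun run (groupRuns arr)) := by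
  induction arr with
  | nil =>
    intro total run hr
    by_cases h0 : run = 0
    · subst h0; simp [aGo, prependRun, groupRuns, sumRuns]
    · simp [aGo, prependRun, groupRuns, h0, sumRuns]
      split_ifs <;> simp_all
  | cons v rest ih =>
    intro total run hr
    by_cases hv : v = 0
    · -- falsy element: flush
      have h1 := ih (if min_run ≤ run then total + run else total) 0 (le_refl 0)
      simp only [aGo, hv, bne_self_eq_false, Bool.false_eq_true,
        if_false] at *
      rw [h1]
      have hpz : prependRun 0 (groupRuns rest) = groupRuns rest := by simp [prependRun]
      rw [hpz]
      -- RHS: groupRuns (0 :: rest) merges a false group at the head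
      show _ = total + sumRuns min_run (prependRun run (groupRuns (0 :: rest)))
      simp only [groupRuns]
      cases hg : groupRuns rest with
      | nil =>
        by_cases h0 : run = 0
        · subst h0; simp [prependRun, sumRuns]
        · simp [prependRun, h0, sumRuns]
          split_ifs <;> simp_all
      | cons p gs =>
        obtain ⟨k, n⟩ := p
        cases k
        · -- head group already false: merge
          by_cases h0 : run = 0
          · subst h0; simp [prependRun, sumRuns]
          · simp [prependRun, h0, sumRuns]
            split_ifs <;> simp_all
            all_goals ring
        · -- head group true: new false group in front
          by_cases h0 : run = 0
          · subst h0; simp [prependRun, sumRuns]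
          · simp [prependRun, h0, sumRuns]
            split_ifs <;> simp_all
            all_goals ring
    · -- truthy element: extend the run
      have h1 := ih total (run + 1) (by omega)
      have hvb : (v != 0) = true := by simp [bne, hv]
      simp only [aGo, hvb, if_true]
      rw [h1]
      congr 2
      -- prependRun (run+1) (groupRuns rest) = prependRun run (groupRuns (v :: rest))
      simp only [groupRuns, hvb]
      cases hg : groupRuns rest with
      | nil =>
        by_cases h0 : run = 0
        · subst h0; simp [prependRun]
        · simp [prependRun, h0]
          all_goals omega
      | cons p gs =>
        obtain ⟨k, n⟩ := p
        cases k
        · by_cases h0 : run = 0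
          · subst h0; simp [prependRun]
          · simp [prependRun, h0]
            all_goals omega
        · by_cases h0 : run = 0
          · subst h0; simp [prependRun]
            all_goals omega
          · have hne : ¬ run + 1 = 0 := by omega
            simp [prependRun, h0, hne]
            all_goals omega

-- ===== VERDICT (by name: the statement is the Claim_ definition above) =====
theorem sustained_count_py_spec : Claim_equal_sustained_count_py := by
  intro arr min_run _
  show sustained_count_py arr min_run = sustained_count_py_alt arr min_run
  have h := aGo_eq min_run arr 0 0 (le_refl 0)
  simp [prependRun] at h
  simpa [sustained_count_py, sustained_count_py_alt] using h
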